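-- pv_equiv track=rewrite | github.com/MingjunGuo/bdt_5002 | final/Q2/Q2_code/Grid_Based Outlier Discovery.py | check_layer1
-- ===== SOURCE A (Python) =====
-- def check_layer1(cell_matrix, color_matrix,m, count_matrix):
--     '''
--     Step2: for those cell are not red, if there are M objects in cell and Layer-1 neighbors totally,
--     all the objects in this cell are not outlier.
--     :param cell_matrix:
--     :param color_matrix:
--     :param m:
--     :param count_matrix:
--     :return:
--     '''
--     # check all the white cells and check their first layer, if count first layer > m than color it pink
--     for i in range(0, len(cell_matrix)):
--         for j in range(0, len(cell_matrix)):
--             if (color_matrix[i][j] == 0):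
--                 if (i > 0 and i < len(cell_matrix)-1):
--                     x = 0
--                 elif (i > 0):
--                     x = -1
--                 else:
--                     x = 1
--
--                 if (j > 0 and j < len(cell_matrix)-1):
--                     y = 0
--                 elif (j > 0):
--                     y = -1
--                 else:
--                     y = 1
--
--                 if (x == 0 and y == 0):
--                     count_matrix[i][j] += len(cell_matrix[i - 1][j])
--                     count_matrix[i][j] += len(cell_matrix[i + 1][j])
--                     count_matrix[i][j] += len(cell_matrix[i][j - 1])
--                     count_matrix[i][j] += len(cell_matrix[i][j + 1])
--                     count_matrix[i][j] += len(cell_matrix[i - 1][j - 1])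
--                     count_matrix[i][j] += len(cell_matrix[i + 1][j - 1])
--                     count_matrix[i][j] += len(cell_matrix[i - 1][j + 1])
--                     count_matrix[i][j] += len(cell_matrix[i + 1][j + 1])
--                 elif (x == 0 and y == -1):
--                     count_matrix[i][j] += len(cell_matrix[i - 1][j - 1])
--                     count_matrix[i][j] += len(cell_matrix[i + 1][j - 1])
--                     count_matrix[i][j] += len(cell_matrix[i - 1][j])
--                     count_matrix[i][j] += len(cell_matrix[i + 1][j])
--                     count_matrix[i][j] += len(cell_matrix[i][j - 1])
--                 elif (x == 0 and y == 1):
--                     count_matrix[i][j] += len(cell_matrix[i - 1][j + 1])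
--                     count_matrix[i][j] += len(cell_matrix[i + 1][j + 1])
--                     count_matrix[i][j] += len(cell_matrix[i][j + 1])
--                     count_matrix[i][j] += len(cell_matrix[i - 1][j])
--                     count_matrix[i][j] += len(cell_matrix[i + 1][j])
--                 elif (x == -1 and y == 0):
--                     count_matrix[i][j] += len(cell_matrix[i - 1][j])
--                     count_matrix[i][j] += len(cell_matrix[i - 1][j + 1])
--                     count_matrix[i][j] += len(cell_matrix[i - 1][j - 1])
--                     count_matrix[i][j] += len(cell_matrix[i][j - 1])
--                     count_matrix[i][j] += len(cell_matrix[i][j + 1])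
--                 elif (x == -1 and y == -1):
--                     count_matrix[i][j] += len(cell_matrix[i - 1][j])
--                     count_matrix[i][j] += len(cell_matrix[i - 1][j - 1])
--                     count_matrix[i][j] += len(cell_matrix[i][j - 1])
--                 elif (x == -1 and y == 1):
--                     count_matrix[i][j] += len(cell_matrix[i - 1][j])
--                     count_matrix[i][j] += len(cell_matrix[i - 1][j + 1])
--                     count_matrix[i][j] += len(cell_matrix[i][j + 1])
--                 elif (x == 1 and y == 0):
--                     count_matrix[i][j] += len(cell_matrix[i + 1][j])
--                     count_matrix[i][j] += len(cell_matrix[i][j - 1])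
--                     count_matrix[i][j] += len(cell_matrix[i][j + 1])
--                     count_matrix[i][j] += len(cell_matrix[i + 1][j - 1])
--                     count_matrix[i][j] += len(cell_matrix[i + 1][j + 1])
--                 elif (x == 1 and y == -1):
--                     count_matrix[i][j] += len(cell_matrix[i + 1][j])
--                     count_matrix[i][j] += len(cell_matrix[i][j - 1])
--                     count_matrix[i][j] += len(cell_matrix[i + 1][j - 1])
--                 elif (x == 1 and y == 1):
--                     count_matrix[i][j] += len(cell_matrix[i + 1][j])
--                     count_matrix[i][j] += len(cell_matrix[i][j + 1])
--                     count_matrix[i][j] += len(cell_matrix[i + 1][j + 1])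
--
--                 if (count_matrix[i][j] > m):
--                     color_matrix[i][j] = 2
--
--     return cell_matrix, color_matrix, count_matrix
-- ===== SOURCE B (Python) =====
-- def check_layer1(cell_matrix, color_matrix, m, count_matrix):
--     n = len(cell_matrix)
--     for i in range(n):
--         for j in range(n):
--             if color_matrix[i][j] == 0:
--                 c = count_matrix[i][j]
--                 for ni in range(max(0, i - 1), min(n - 1, i + 1) + 1):
--                     for nj in range(max(0, j - 1), min(n - 1, j + 1) + 1):
--                         if (ni, nj) != (i, j):
--                             c += len(cell_matrix[ni][nj])
--                 count_matrix[i][j] = c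
--                 if c > m:
--                     color_matrix[i][j] = 2
--     return cell_matrix, color_matrix, count_matrix
-- ===== Notes on version B (the rewrite author's own statement) =====
-- stated objective: simpler
-- what changed: Replaces the x/y border-sentinel computation and the nine hand-unrolled neighbor branches with a single clamped double loop over neighbor offsets that skips the center cell, accumulating into a local variable written back once.
-- crash fix: On a 1x1 grid whose single cell is white, A raises IndexError (its border sentinels select a branch that reads cell_matrix[i+1]); B returns the matrices with that cell's count unchanged (no neighbors). — e.g. on check_layer1([[[7]]], [[0]], 0, [[0]]): A raises IndexError, B returns ([[[7]]], [[0]], [[0]])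
import Mathlib
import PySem

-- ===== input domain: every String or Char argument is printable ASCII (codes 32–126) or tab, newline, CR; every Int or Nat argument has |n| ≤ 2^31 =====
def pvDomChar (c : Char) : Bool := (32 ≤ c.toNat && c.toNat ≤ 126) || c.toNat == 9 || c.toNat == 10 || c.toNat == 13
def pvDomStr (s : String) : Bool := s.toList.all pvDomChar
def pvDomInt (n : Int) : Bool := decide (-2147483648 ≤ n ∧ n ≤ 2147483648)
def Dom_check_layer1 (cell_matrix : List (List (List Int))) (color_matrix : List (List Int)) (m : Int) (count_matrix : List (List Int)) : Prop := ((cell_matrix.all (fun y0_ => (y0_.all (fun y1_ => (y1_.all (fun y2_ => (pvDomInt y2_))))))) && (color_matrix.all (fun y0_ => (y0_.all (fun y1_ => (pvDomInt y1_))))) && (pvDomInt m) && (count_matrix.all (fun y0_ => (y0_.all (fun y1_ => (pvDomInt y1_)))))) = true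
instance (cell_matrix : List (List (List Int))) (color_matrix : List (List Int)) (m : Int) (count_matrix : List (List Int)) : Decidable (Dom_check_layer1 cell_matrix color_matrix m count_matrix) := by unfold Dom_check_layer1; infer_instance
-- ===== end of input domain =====

-- B replaces A's x/y border sentinels and nine unrolled neighbor branches by one clamped
-- double loop over neighbor offsets (objective: simpler).  Both Pythons mutate
-- color_matrix/count_matrix in place in the same way; the theorems are about the returned triple.

-- shared low-level helpers (used by both ports, mirroring list indexing/assignment)
def pvModAt {α : Type} (l : List α) (i : Nat) (f : α → α) : List α :=
  match l, i with
  | [], _ => []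
  | a :: t, 0 => f a :: t
  | a :: t, n + 1 => a :: pvModAt t n f

-- mat[i][j] (read, Python indexing via PySem; defaults unreachable under Pre_)
def pvGet2 (mat : List (List Int)) (i j : Int) : Int :=
  PySem.List.pyGetD (PySem.List.pyGetD mat i []) j 0

-- mat[i][j] = v  (i, j are the nonnegative loop indices)
def pvSet2 (mat : List (List Int)) (i j : Int) (v : Int) : List (List Int) :=
  pvModAt mat i.toNat (fun r => pvModAt r j.toNat (fun _ => v))

-- count_matrix[i][j] += v
def pvAdd2 (mat : List (List Int)) (i j : Int) (v : Int) : List (List Int) :=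
  pvModAt mat i.toNat (fun r => pvModAt r j.toNat (fun x => x + v))

-- len(cell_matrix[i][j])
def pvCellLen (cm : List (List (List Int))) (i j : Int) : Int :=
  ((PySem.List.pyGetD (PySem.List.pyGetD cm i []) j []).length : Int)

-- ===== PORT A =====
-- one body of A's double loop: state = (color_matrix, count_matrix)
def pvStepA (cm : List (List (List Int))) (m : Int)
    (s : List (List Int) × List (List Int)) (i j : Int) :
    List (List Int) × List (List Int) :=
  let n : Int := cm.length
  if pvGet2 s.1 i j = 0 then
    let x : Int := if 0 < i ∧ i < n - 1 then 0 else if 0 < i then -1 else 1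
    let y : Int := if 0 < j ∧ j < n - 1 then 0 else if 0 < j then -1 else 1
    let cnt :=
      if x = 0 ∧ y = 0 then
        pvAdd2 (pvAdd2 (pvAdd2 (pvAdd2 (pvAdd2 (pvAdd2 (pvAdd2 (pvAdd2 s.2
          i j (pvCellLen cm (i-1) j)) i j (pvCellLen cm (i+1) j)) i j (pvCellLen cm i (j-1)))
          i j (pvCellLen cm i (j+1))) i j (pvCellLen cm (i-1) (j-1))) i j (pvCellLen cm (i+1) (j-1)))
          i j (pvCellLen cm (i-1) (j+1))) i j (pvCellLen cm (i+1) (j+1))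
      else if x = 0 ∧ y = -1 then
        pvAdd2 (pvAdd2 (pvAdd2 (pvAdd2 (pvAdd2 s.2
          i j (pvCellLen cm (i-1) (j-1))) i j (pvCellLen cm (i+1) (j-1))) i j (pvCellLen cm (i-1) j))
          i j (pvCellLen cm (i+1) j)) i j (pvCellLen cm i (j-1))
      else if x = 0 ∧ y = 1 then
        pvAdd2 (pvAdd2 (pvAdd2 (pvAdd2 (pvAdd2 s.2
          i j (pvCellLen cm (i-1) (j+1))) i j (pvCellLen cm (i+1) (j+1))) i j (pvCellLen cm i (j+1)))
          i j (pvCellLen cm (i-1) j)) i j (pvCellLen cm (i+1) j)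
      else if x = -1 ∧ y = 0 then
        pvAdd2 (pvAdd2 (pvAdd2 (pvAdd2 (pvAdd2 s.2
          i j (pvCellLen cm (i-1) j)) i j (pvCellLen cm (i-1) (j+1))) i j (pvCellLen cm (i-1) (j-1)))
          i j (pvCellLen cm i (j-1))) i j (pvCellLen cm i (j+1))
      else if x = -1 ∧ y = -1 then
        pvAdd2 (pvAdd2 (pvAdd2 s.2
          i j (pvCellLen cm (i-1) j)) i j (pvCellLen cm (i-1) (j-1))) i j (pvCellLen cm i (j-1))
      else if x = -1 ∧ y = 1 then
        pvAdd2 (pvAdd2 (pvAdd2 s.2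
          i j (pvCellLen cm (i-1) j)) i j (pvCellLen cm (i-1) (j+1))) i j (pvCellLen cm i (j+1))
      else if x = 1 ∧ y = 0 then
        pvAdd2 (pvAdd2 (pvAdd2 (pvAdd2 (pvAdd2 s.2
          i j (pvCellLen cm (i+1) j)) i j (pvCellLen cm i (j-1))) i j (pvCellLen cm i (j+1)))
          i j (pvCellLen cm (i+1) (j-1))) i j (pvCellLen cm (i+1) (j+1))
      else if x = 1 ∧ y = -1 then
        pvAdd2 (pvAdd2 (pvAdd2 s.2
          i j (pvCellLen cm (i+1) j)) i j (pvCellLen cm i (j-1))) i j (pvCellLen cm (i+1) (j-1))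
      else if x = 1 ∧ y = 1 then
        pvAdd2 (pvAdd2 (pvAdd2 s.2
          i j (pvCellLen cm (i+1) j)) i j (pvCellLen cm i (j+1))) i j (pvCellLen cm (i+1) (j+1))
      else s.2
    let color := if pvGet2 cnt i j > m then pvSet2 s.1 i j 2 else s.1
    (color, cnt)
  else s

def check_layer1 (cell_matrix : List (List (List Int))) (color_matrix : List (List Int)) (m : Int) (count_matrix : List (List Int)) : List (List (List Int)) × List (List Int) × List (List Int) :=
  let n : Int := cell_matrix.length
  let s := (PySem.List.pyRange 0 n 1).foldl
    (fun s i => (PySem.List.pyRange 0 n 1).foldl (fun s j => pvStepA cell_matrix m s i j) s)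
    (color_matrix, count_matrix)
  (cell_matrix, s.1, s.2)

-- ===== PORT B =====
-- one body of B's double loop: clamped neighbor-offset loops accumulate into c, written back once
def pvStepB (cm : List (List (List Int))) (m : Int)
    (s : List (List Int) × List (List Int)) (i j : Int) :
    List (List Int) × List (List Int) :=
  let n : Int := cm.length
  if pvGet2 s.1 i j = 0 then
    let c := (PySem.List.pyRange (max 0 (i-1)) (min (n-1) (i+1) + 1) 1).foldl
      (fun c ni => (PySem.List.pyRange (max 0 (j-1)) (min (n-1) (j+1) + 1) 1).foldl
        (fun c nj => if (ni, nj) ≠ (i, j) then c + pvCellLen cm ni nj else c) c)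
      (pvGet2 s.2 i j)
    let cnt := pvSet2 s.2 i j c
    let color := if c > m then pvSet2 s.1 i j 2 else s.1
    (color, cnt)
  else s

def check_layer1_alt (cell_matrix : List (List (List Int))) (color_matrix : List (List Int)) (m : Int) (count_matrix : List (List Int)) : List (List (List Int)) × List (List Int) × List (List Int) :=
  let n : Int := cell_matrix.length
  let s := (PySem.List.pyRange 0 n 1).foldl
    (fun s i => (PySem.List.pyRange 0 n 1).foldl (fun s j => pvStepB cell_matrix m s i j) s)
    (color_matrix, count_matrix)
  (cell_matrix, s.1, s.2)

-- ===== PRECONDITION & SPEC =====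
-- Pre_ excludes the inputs on which A raises IndexError: it asks for the full n×n shape
-- (n = len(cell_matrix); A indexes color/count and the cells' layer-1 neighborhood up to
-- index n-1) and, because on a 1×1 grid a white cell makes A read cell_matrix[i+1] (IndexError),
-- it forbids a white cell on a 1×1 grid.  (The shape demand is applied to every row, also where
-- a non-white cell would let A skip the access: a mild, stated narrowing.)
def Pre_check_layer1 (cell_matrix : List (List (List Int))) (color_matrix : List (List Int)) (m : Int) (count_matrix : List (List Int)) : Prop :=
  -- first disjunct: no white cell at all — A touches nothing and returns, whatever the shapes
  (∀ i, i < cell_matrix.length → ∀ j, j < cell_matrix.length →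
    (color_matrix.getD i []).getD j 0 ≠ 0) ∨
  (∀ row ∈ cell_matrix, cell_matrix.length ≤ row.length) ∧
  cell_matrix.length ≤ color_matrix.length ∧
  (∀ row ∈ color_matrix, cell_matrix.length ≤ row.length) ∧
  cell_matrix.length ≤ count_matrix.length ∧
  (∀ row ∈ count_matrix, cell_matrix.length ≤ row.length) ∧
  (cell_matrix.length = 1 → (color_matrix.getD 0 []).getD 0 0 ≠ 0)
instance (cell_matrix : List (List (List Int))) (color_matrix : List (List Int)) (m : Int) (count_matrix : List (List Int)) : Decidable (Pre_check_layer1 cell_matrix color_matrix m count_matrix) := by unfold Pre_check_layer1; infer_instance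

def pvWitness_check_layer1 : List (List (List Int)) × List (List Int) × Int × List (List Int) :=
  ([[[1], [2]], [[3], []]], [[0, 0], [0, 1]], 1, [[0, 0], [0, 0]])

-- On a 1×1 grid whose single cell is white (and color/count have that entry), A raises
-- IndexError reading cell_matrix[i+1] while B returns the matrices with the count unchanged.
def Raises_check_layer1 (cell_matrix : List (List (List Int))) (color_matrix : List (List Int)) (m : Int) (count_matrix : List (List Int)) : Prop :=
  cell_matrix.length = 1 ∧
  1 ≤ color_matrix.length ∧ 1 ≤ (color_matrix.getD 0 []).length ∧
  1 ≤ count_matrix.length ∧ 1 ≤ (count_matrix.getD 0 []).length ∧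
  (color_matrix.getD 0 []).getD 0 0 = 0
instance (cell_matrix : List (List (List Int))) (color_matrix : List (List Int)) (m : Int) (count_matrix : List (List Int)) : Decidable (Raises_check_layer1 cell_matrix color_matrix m count_matrix) := by unfold Raises_check_layer1; infer_instance
def pvRaiseWitness_check_layer1 : List (List (List Int)) × List (List Int) × Int × List (List Int) :=
  ([[[7]]], [[0]], 0, [[0]])
def pvRaiseWitnessOut_check_layer1 : List (List (List Int)) × List (List Int) × List (List Int) :=
  ([[[7]]], [[0]], [[0]])

def Spec_check_layer1 (cell_matrix : List (List (List Int))) (color_matrix : List (List Int)) (m : Int) (count_matrix : List (List Int)) (out : List (List (List Int)) × List (List Int) × List (List Int)) : Prop := out = check_layer1_alt cell_matrix color_matrix m count_matrix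
instance (cell_matrix : List (List (List Int))) (color_matrix : List (List Int)) (m : Int) (count_matrix : List (List Int)) (out : List (List (List Int)) × List (List Int) × List (List Int)) : Decidable (Spec_check_layer1 cell_matrix color_matrix m count_matrix out) := by unfold Spec_check_layer1; infer_instance

-- ===== CLAIM (what is proved, stated in full; the proofs are below) =====
def Claim_equal_check_layer1 : Prop := ∀ (cell_matrix : List (List (List Int))) (color_matrix : List (List Int)) (m : Int) (count_matrix : List (List Int)), Dom_check_layer1 cell_matrix color_matrix m count_matrix → Pre_check_layer1 cell_matrix color_matrix m count_matrix → Spec_check_layer1 cell_matrix color_matrix m count_matrix (check_layer1 cell_matrix color_matrix m count_matrix)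

def Claim_raises_check_layer1 : Prop := (∀ (cell_matrix : List (List (List Int))) (color_matrix : List (List Int)) (m : Int) (count_matrix : List (List Int)), Dom_check_layer1 cell_matrix color_matrix m count_matrix → Raises_check_layer1 cell_matrix color_matrix m count_matrix → ¬ Pre_check_layer1 cell_matrix color_matrix m count_matrix) ∧ (Dom_check_layer1 (pvRaiseWitness_check_layer1.1) (pvRaiseWitness_check_layer1.2.1) (pvRaiseWitness_check_layer1.2.2.1) (pvRaiseWitness_check_layer1.2.2.2) ∧ Raises_check_layer1 (pvRaiseWitness_check_layer1.1) (pvRaiseWitness_check_layer1.2.1) (pvRaiseWitness_check_layer1.2.2.1) (pvRaiseWitness_check_layer1.2.2.2) ∧ check_layer1_alt (pvRaiseWitness_check_layer1.1) (pvRaiseWitness_check_layer1.2.1) (pvRaiseWitness_check_layer1.2.2.1) (pvRaiseWitness_check_layer1.2.2.2) = pvRaiseWitnessOut_check_layer1)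

-- ===== LEMMAS AND PROOFS =====

-- generic fold tools
theorem pvFoldl_inv {α β : Type} (Inv : β → Prop) (f : β → α → β) (l : List α) (s : β)
    (hs : Inv s) (h : ∀ s a, Inv s → a ∈ l → Inv (f s a)) : Inv (l.foldl f s) := by
  induction l generalizing s with
  | nil => exact hs
  | cons a t ih =>
    exact ih (f s a) (h s a hs (List.mem_cons_self)) (fun s b hI hb => h s b hI (List.mem_cons_of_mem _ hb))

theorem pvFoldl_id {α β : Type} (P : β → Prop) (f : β → α → β) (l : List α) (s : β)
    (hs : P s) (h : ∀ s a, P s → a ∈ l → f s a = s) : l.foldl f s = s := by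
  induction l generalizing s with
  | nil => rfl
  | cons a t ih =>
    rw [List.foldl_cons, h s a hs (List.mem_cons_self)]
    exact ih s hs (fun s b hP hb => h s b hP (List.mem_cons_of_mem _ hb))

theorem pvFoldl_congr_inv {α β : Type} (Inv : β → Prop) (f g : β → α → β) (l : List α) (s : β)
    (hs : Inv s) (h : ∀ s a, Inv s → a ∈ l → f s a = g s a ∧ Inv (f s a)) :
    l.foldl f s = l.foldl g s := by
  induction l generalizing s with
  | nil => rfl
  | cons a t ih =>
    have h1 := h s a hs (List.mem_cons_self)
    rw [List.foldl_cons, List.foldl_cons, ← h1.1]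
    exact ih (f s a) h1.2 (fun s b hI hb => h s b hI (List.mem_cons_of_mem _ hb))

-- pvModAt basics
theorem pvModAt_length {α : Type} (l : List α) (i : Nat) (f : α → α) :
    (pvModAt l i f).length = l.length := by
  induction l generalizing i with
  | nil => rfl
  | cons a t ih => cases i <;> simp [pvModAt, ih]

theorem pvModAt_pvModAt {α : Type} (l : List α) (i : Nat) (f g : α → α) :
    pvModAt (pvModAt l i f) i g = pvModAt l i (fun x => g (f x)) := by
  induction l generalizing i with
  | nil => rfl
  | cons a t ih => cases i <;> simp [pvModAt, ih]

theorem pvModAt_eq_of_eq_at {α : Type} (l : List α) (i : Nat) (f g : α → α)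
    (h : ∀ hlt : i < l.length, f l[i] = g l[i]) : pvModAt l i f = pvModAt l i g := by
  induction l generalizing i with
  | nil => rfl
  | cons a t ih =>
    cases i with
    | zero =>
      have h0 := h (by simp)
      simp only [List.getElem_cons_zero] at h0
      simp [pvModAt, h0]
    | succ k =>
      have ih' := ih k (fun hk => by simpa using h (by simpa using hk))
      simp [pvModAt, ih']

theorem pvModAt_getD_self {α : Type} (l : List α) (i : Nat) (f : α → α) (d : α)
    (h : i < l.length) : (pvModAt l i f).getD i d = f l[i] := by
  induction l generalizing i with
  | nil => simp at h
  | cons a t ih =>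
    cases i with
    | zero => simp [pvModAt]
    | succ k => simpa [pvModAt] using ih k (by simpa using h)

theorem pvModAt_map_length (l : List (List Int)) (i : Nat) (f : List Int → List Int)
    (hf : ∀ r, (f r).length = r.length) :
    (pvModAt l i f).map List.length = l.map List.length := by
  induction l generalizing i with
  | nil => rfl
  | cons a t ih => cases i <;> simp [pvModAt, hf, ih]

-- shape lemmas
theorem pvAdd2_shape (mat : List (List Int)) (i j v : Int) :
    (pvAdd2 mat i j v).map List.length = mat.map List.length :=
  pvModAt_map_length _ _ _ (fun r => pvModAt_length r _ _)

set_option maxHeartbeats 1600000 in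
theorem pvStepA_shape (cm : List (List (List Int))) (m : Int)
    (s : List (List Int) × List (List Int)) (i j : Int) :
    (pvStepA cm m s i j).2.map List.length = s.2.map List.length := by
  unfold pvStepA
  by_cases h : pvGet2 s.1 i j = 0
  · rw [if_pos h]
    repeat' split
    all_goals simp [pvAdd2_shape]
  · rw [if_neg h]

-- collapsing A's chain of `+=`
theorem pvAdd2_pvAdd2 (mat : List (List Int)) (i j a b : Int) :
    pvAdd2 (pvAdd2 mat i j a) i j b = pvAdd2 mat i j (a + b) := by
  unfold pvAdd2
  rw [pvModAt_pvModAt]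
  refine pvModAt_eq_of_eq_at _ _ _ _ (fun _ => ?_)
  rw [pvModAt_pvModAt]
  refine pvModAt_eq_of_eq_at _ _ _ _ (fun _ => ?_)
  ring_nf

-- one `+=` of v is: write back (old value + v)
theorem pvAdd2_eq_set (mat : List (List Int)) (i j v : Int) (hi : 0 ≤ i) (hj : 0 ≤ j) :
    pvAdd2 mat i j v = pvSet2 mat i j (pvGet2 mat i j + v) := by
  unfold pvAdd2 pvSet2 pvGet2
  refine pvModAt_eq_of_eq_at _ _ _ _ (fun hlt => ?_)
  refine pvModAt_eq_of_eq_at _ _ _ _ (fun hlt2 => ?_)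
  rw [PySem.List.pyGetD_of_nonneg _ _ hi, PySem.List.pyGetD_of_nonneg _ _ hj,
      List.getD_eq_getElem _ _ hlt, List.getD_eq_getElem _ _ hlt2]

theorem pvGet2_pvSet2_self (mat : List (List Int)) (i j v : Int) (hi : 0 ≤ i) (hj : 0 ≤ j)
    (h1 : i.toNat < mat.length) (h2 : j.toNat < (mat.getD i.toNat []).length) :
    pvGet2 (pvSet2 mat i j v) i j = v := by
  unfold pvGet2 pvSet2
  rw [PySem.List.pyGetD_of_nonneg _ _ hi, PySem.List.pyGetD_of_nonneg _ _ hj,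
      pvModAt_getD_self _ _ _ _ h1,
      pvModAt_getD_self _ _ _ _ (by rwa [List.getD_eq_getElem _ _ h1] at h2)]

-- literal expansions of the clamped ranges
theorem pvRange_pair (a b c : Int) (h1 : b = a + 1) (h2 : c = a + 2) :
    PySem.List.pyRange a c 1 = [a, b] := by
  rw [PySem.List.pyRange_one_cons (by omega), PySem.List.pyRange_one_cons (by omega),
      PySem.List.pyRange_one_eq_nil (by omega), h1]

theorem pvRange_triple (a b c d : Int) (h1 : b = a + 1) (h2 : c = a + 2) (h3 : d = a + 3) :
    PySem.List.pyRange a d 1 = [a, b, c] := by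
  rw [PySem.List.pyRange_one_cons (by omega), PySem.List.pyRange_one_cons (by omega),
      PySem.List.pyRange_one_cons (by omega), PySem.List.pyRange_one_eq_nil (by omega), h1, h2]
  norm_num
  omega

-- the heart: for n ≥ 2 and in-range (i, j) with the count entry addressable,
-- one iteration of A equals one iteration of B
theorem pvStep_eq (cm : List (List (List Int))) (m : Int)
    (s : List (List Int) × List (List Int)) (i j : Int)
    (hn : 2 ≤ (cm.length : Int))
    (hi0 : 0 ≤ i) (hi1 : i < (cm.length : Int)) (hj0 : 0 ≤ j) (hj1 : j < (cm.length : Int))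
    (h1 : i.toNat < s.2.length) (h2 : j.toNat < (s.2.getD i.toNat []).length) :
    pvStepA cm m s i j = pvStepB cm m s i j := by
  by_cases hw : pvGet2 s.1 i j = 0
  case neg => unfold pvStepA pvStepB; rw [if_neg hw, if_neg hw]
  case pos =>
  have d1 : i - 1 ≠ i := by omega
  have d2 : i + 1 ≠ i := by omega
  have d3 : j - 1 ≠ j := by omega
  have d4 : j + 1 ≠ j := by omega
  simp only [pvStepA, pvStepB, if_pos hw]
  have hI : i = 0 ∨ (0 < i ∧ i < (cm.length:Int) - 1) ∨ i = (cm.length:Int) - 1 := by omega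
  have hJ : j = 0 ∨ (0 < j ∧ j < (cm.length:Int) - 1) ∨ j = (cm.length:Int) - 1 := by omega
  rcases hI with hI | hI | hI <;> rcases hJ with hJ | hJ | hJ
  · -- i lo, j lo
    have hx : (if 0 < i ∧ i < (cm.length:Int) - 1 then (0:Int) else if 0 < i then -1 else 1) = 1 := by
      rw [if_neg (by omega), if_neg (by omega)]
    have hy : (if 0 < j ∧ j < (cm.length:Int) - 1 then (0:Int) else if 0 < j then -1 else 1) = 1 := by
      rw [if_neg (by omega), if_neg (by omega)]
    have hRi : PySem.List.pyRange (max 0 (i-1)) (min ((cm.length:Int)-1) (i+1) + 1) 1 = [i, i+1] := by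
      rw [show max 0 (i-1) = i by omega, show min ((cm.length:Int)-1) (i+1) + 1 = i + 2 by omega]
      exact pvRange_pair _ _ _ rfl rfl
    have hRj : PySem.List.pyRange (max 0 (j-1)) (min ((cm.length:Int)-1) (j+1) + 1) 1 = [j, j+1] := by
      rw [show max 0 (j-1) = j by omega, show min ((cm.length:Int)-1) (j+1) + 1 = j + 2 by omega]
      exact pvRange_pair _ _ _ rfl rfl
    simp only [hx, hy, hRi, hRj]
    norm_num
    try simp [d1, d2, d3, d4]
    simp only [pvAdd2_pvAdd2]
    rw [pvAdd2_eq_set _ _ _ _ hi0 hj0, pvGet2_pvSet2_self _ _ _ _ hi0 hj0 h1 h2]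
    ring_nf
    try exact ⟨trivial, trivial⟩
  · -- i lo, j mid
    have hx : (if 0 < i ∧ i < (cm.length:Int) - 1 then (0:Int) else if 0 < i then -1 else 1) = 1 := by
      rw [if_neg (by omega), if_neg (by omega)]
    have hy : (if 0 < j ∧ j < (cm.length:Int) - 1 then (0:Int) else if 0 < j then -1 else 1) = 0 := by
      rw [if_pos (by omega)]
    have hRi : PySem.List.pyRange (max 0 (i-1)) (min ((cm.length:Int)-1) (i+1) + 1) 1 = [i, i+1] := by
      rw [show max 0 (i-1) = i by omega, show min ((cm.length:Int)-1) (i+1) + 1 = i + 2 by omega]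
      exact pvRange_pair _ _ _ rfl rfl
    have hRj : PySem.List.pyRange (max 0 (j-1)) (min ((cm.length:Int)-1) (j+1) + 1) 1 = [j-1, j, j+1] := by
      rw [show max 0 (j-1) = j-1 by omega, show min ((cm.length:Int)-1) (j+1) + 1 = (j-1) + 3 by omega]
      exact pvRange_triple _ _ _ _ (by ring) (by ring) rfl
    simp only [hx, hy, hRi, hRj]
    norm_num
    try simp [d1, d2, d3, d4]
    simp only [pvAdd2_pvAdd2]
    rw [pvAdd2_eq_set _ _ _ _ hi0 hj0, pvGet2_pvSet2_self _ _ _ _ hi0 hj0 h1 h2]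
    ring_nf
    try exact ⟨trivial, trivial⟩
  · -- i lo, j hi
    have hx : (if 0 < i ∧ i < (cm.length:Int) - 1 then (0:Int) else if 0 < i then -1 else 1) = 1 := by
      rw [if_neg (by omega), if_neg (by omega)]
    have hy : (if 0 < j ∧ j < (cm.length:Int) - 1 then (0:Int) else if 0 < j then -1 else 1) = -1 := by
      rw [if_neg (by omega), if_pos (by omega)]
    have hRi : PySem.List.pyRange (max 0 (i-1)) (min ((cm.length:Int)-1) (i+1) + 1) 1 = [i, i+1] := by
      rw [show max 0 (i-1) = i by omega, show min ((cm.length:Int)-1) (i+1) + 1 = i + 2 by omega]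
      exact pvRange_pair _ _ _ rfl rfl
    have hRj : PySem.List.pyRange (max 0 (j-1)) (min ((cm.length:Int)-1) (j+1) + 1) 1 = [j-1, j] := by
      rw [show max 0 (j-1) = j-1 by omega, show min ((cm.length:Int)-1) (j+1) + 1 = (j-1) + 2 by omega]
      exact pvRange_pair _ _ _ (by ring) rfl
    simp only [hx, hy, hRi, hRj]
    norm_num
    try simp [d1, d2, d3, d4]
    simp only [pvAdd2_pvAdd2]
    rw [pvAdd2_eq_set _ _ _ _ hi0 hj0, pvGet2_pvSet2_self _ _ _ _ hi0 hj0 h1 h2]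
    ring_nf
    try exact ⟨trivial, trivial⟩
  · -- i mid, j lo
    have hx : (if 0 < i ∧ i < (cm.length:Int) - 1 then (0:Int) else if 0 < i then -1 else 1) = 0 := by
      rw [if_pos (by omega)]
    have hy : (if 0 < j ∧ j < (cm.length:Int) - 1 then (0:Int) else if 0 < j then -1 else 1) = 1 := by
      rw [if_neg (by omega), if_neg (by omega)]
    have hRi : PySem.List.pyRange (max 0 (i-1)) (min ((cm.length:Int)-1) (i+1) + 1) 1 = [i-1, i, i+1] := by
      rw [show max 0 (i-1) = i-1 by omega, show min ((cm.length:Int)-1) (i+1) + 1 = (i-1) + 3 by omega]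
      exact pvRange_triple _ _ _ _ (by ring) (by ring) rfl
    have hRj : PySem.List.pyRange (max 0 (j-1)) (min ((cm.length:Int)-1) (j+1) + 1) 1 = [j, j+1] := by
      rw [show max 0 (j-1) = j by omega, show min ((cm.length:Int)-1) (j+1) + 1 = j + 2 by omega]
      exact pvRange_pair _ _ _ rfl rfl
    simp only [hx, hy, hRi, hRj]
    norm_num
    try simp [d1, d2, d3, d4]
    simp only [pvAdd2_pvAdd2]
    rw [pvAdd2_eq_set _ _ _ _ hi0 hj0, pvGet2_pvSet2_self _ _ _ _ hi0 hj0 h1 h2]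
    ring_nf
    try exact ⟨trivial, trivial⟩
  · -- i mid, j mid
    have hx : (if 0 < i ∧ i < (cm.length:Int) - 1 then (0:Int) else if 0 < i then -1 else 1) = 0 := by
      rw [if_pos (by omega)]
    have hy : (if 0 < j ∧ j < (cm.length:Int) - 1 then (0:Int) else if 0 < j then -1 else 1) = 0 := by
      rw [if_pos (by omega)]
    have hRi : PySem.List.pyRange (max 0 (i-1)) (min ((cm.length:Int)-1) (i+1) + 1) 1 = [i-1, i, i+1] := by
      rw [show max 0 (i-1) = i-1 by omega, show min ((cm.length:Int)-1) (i+1) + 1 = (i-1) + 3 by omega]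
      exact pvRange_triple _ _ _ _ (by ring) (by ring) rfl
    have hRj : PySem.List.pyRange (max 0 (j-1)) (min ((cm.length:Int)-1) (j+1) + 1) 1 = [j-1, j, j+1] := by
      rw [show max 0 (j-1) = j-1 by omega, show min ((cm.length:Int)-1) (j+1) + 1 = (j-1) + 3 by omega]
      exact pvRange_triple _ _ _ _ (by ring) (by ring) rfl
    simp only [hx, hy, hRi, hRj]
    norm_num
    try simp [d1, d2, d3, d4]
    simp only [pvAdd2_pvAdd2]
    rw [pvAdd2_eq_set _ _ _ _ hi0 hj0, pvGet2_pvSet2_self _ _ _ _ hi0 hj0 h1 h2]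
    ring_nf
    try exact ⟨trivial, trivial⟩
  · -- i mid, j hi
    have hx : (if 0 < i ∧ i < (cm.length:Int) - 1 then (0:Int) else if 0 < i then -1 else 1) = 0 := by
      rw [if_pos (by omega)]
    have hy : (if 0 < j ∧ j < (cm.length:Int) - 1 then (0:Int) else if 0 < j then -1 else 1) = -1 := by
      rw [if_neg (by omega), if_pos (by omega)]
    have hRi : PySem.List.pyRange (max 0 (i-1)) (min ((cm.length:Int)-1) (i+1) + 1) 1 = [i-1, i, i+1] := by
      rw [show max 0 (i-1) = i-1 by omega, show min ((cm.length:Int)-1) (i+1) + 1 = (i-1) + 3 by omega]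
      exact pvRange_triple _ _ _ _ (by ring) (by ring) rfl
    have hRj : PySem.List.pyRange (max 0 (j-1)) (min ((cm.length:Int)-1) (j+1) + 1) 1 = [j-1, j] := by
      rw [show max 0 (j-1) = j-1 by omega, show min ((cm.length:Int)-1) (j+1) + 1 = (j-1) + 2 by omega]
      exact pvRange_pair _ _ _ (by ring) rfl
    simp only [hx, hy, hRi, hRj]
    norm_num
    try simp [d1, d2, d3, d4]
    simp only [pvAdd2_pvAdd2]
    rw [pvAdd2_eq_set _ _ _ _ hi0 hj0, pvGet2_pvSet2_self _ _ _ _ hi0 hj0 h1 h2]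
    ring_nf
    try exact ⟨trivial, trivial⟩
  · -- i hi, j lo
    have hx : (if 0 < i ∧ i < (cm.length:Int) - 1 then (0:Int) else if 0 < i then -1 else 1) = -1 := by
      rw [if_neg (by omega), if_pos (by omega)]
    have hy : (if 0 < j ∧ j < (cm.length:Int) - 1 then (0:Int) else if 0 < j then -1 else 1) = 1 := by
      rw [if_neg (by omega), if_neg (by omega)]
    have hRi : PySem.List.pyRange (max 0 (i-1)) (min ((cm.length:Int)-1) (i+1) + 1) 1 = [i-1, i] := by
      rw [show max 0 (i-1) = i-1 by omega, show min ((cm.length:Int)-1) (i+1) + 1 = (i-1) + 2 by omega]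
      exact pvRange_pair _ _ _ (by ring) rfl
    have hRj : PySem.List.pyRange (max 0 (j-1)) (min ((cm.length:Int)-1) (j+1) + 1) 1 = [j, j+1] := by
      rw [show max 0 (j-1) = j by omega, show min ((cm.length:Int)-1) (j+1) + 1 = j + 2 by omega]
      exact pvRange_pair _ _ _ rfl rfl
    simp only [hx, hy, hRi, hRj]
    norm_num
    try simp [d1, d2, d3, d4]
    simp only [pvAdd2_pvAdd2]
    rw [pvAdd2_eq_set _ _ _ _ hi0 hj0, pvGet2_pvSet2_self _ _ _ _ hi0 hj0 h1 h2]
    ring_nf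
    try exact ⟨trivial, trivial⟩
  · -- i hi, j mid
    have hx : (if 0 < i ∧ i < (cm.length:Int) - 1 then (0:Int) else if 0 < i then -1 else 1) = -1 := by
      rw [if_neg (by omega), if_pos (by omega)]
    have hy : (if 0 < j ∧ j < (cm.length:Int) - 1 then (0:Int) else if 0 < j then -1 else 1) = 0 := by
      rw [if_pos (by omega)]
    have hRi : PySem.List.pyRange (max 0 (i-1)) (min ((cm.length:Int)-1) (i+1) + 1) 1 = [i-1, i] := by
      rw [show max 0 (i-1) = i-1 by omega, show min ((cm.length:Int)-1) (i+1) + 1 = (i-1) + 2 by omega]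
      exact pvRange_pair _ _ _ (by ring) rfl
    have hRj : PySem.List.pyRange (max 0 (j-1)) (min ((cm.length:Int)-1) (j+1) + 1) 1 = [j-1, j, j+1] := by
      rw [show max 0 (j-1) = j-1 by omega, show min ((cm.length:Int)-1) (j+1) + 1 = (j-1) + 3 by omega]
      exact pvRange_triple _ _ _ _ (by ring) (by ring) rfl
    simp only [hx, hy, hRi, hRj]
    norm_num
    try simp [d1, d2, d3, d4]
    simp only [pvAdd2_pvAdd2]
    rw [pvAdd2_eq_set _ _ _ _ hi0 hj0, pvGet2_pvSet2_self _ _ _ _ hi0 hj0 h1 h2]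
    ring_nf
    try exact ⟨trivial, trivial⟩
  · -- i hi, j hi
    have hx : (if 0 < i ∧ i < (cm.length:Int) - 1 then (0:Int) else if 0 < i then -1 else 1) = -1 := by
      rw [if_neg (by omega), if_pos (by omega)]
    have hy : (if 0 < j ∧ j < (cm.length:Int) - 1 then (0:Int) else if 0 < j then -1 else 1) = -1 := by
      rw [if_neg (by omega), if_pos (by omega)]
    have hRi : PySem.List.pyRange (max 0 (i-1)) (min ((cm.length:Int)-1) (i+1) + 1) 1 = [i-1, i] := by
      rw [show max 0 (i-1) = i-1 by omega, show min ((cm.length:Int)-1) (i+1) + 1 = (i-1) + 2 by omega]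
      exact pvRange_pair _ _ _ (by ring) rfl
    have hRj : PySem.List.pyRange (max 0 (j-1)) (min ((cm.length:Int)-1) (j+1) + 1) 1 = [j-1, j] := by
      rw [show max 0 (j-1) = j-1 by omega, show min ((cm.length:Int)-1) (j+1) + 1 = (j-1) + 2 by omega]
      exact pvRange_pair _ _ _ (by ring) rfl
    simp only [hx, hy, hRi, hRj]
    norm_num
    try simp [d1, d2, d3, d4]
    simp only [pvAdd2_pvAdd2]
    rw [pvAdd2_eq_set _ _ _ _ hi0 hj0, pvGet2_pvSet2_self _ _ _ _ hi0 hj0 h1 h2]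
    ring_nf
    try exact ⟨trivial, trivial⟩

theorem pvStepA_not_white (cm : List (List (List Int))) (m : Int)
    (s : List (List Int) × List (List Int)) (i j : Int) (h : ¬ pvGet2 s.1 i j = 0) :
    pvStepA cm m s i j = s := by
  unfold pvStepA; rw [if_neg h]

theorem pvStepB_not_white (cm : List (List (List Int))) (m : Int)
    (s : List (List Int) × List (List Int)) (i j : Int) (h : ¬ pvGet2 s.1 i j = 0) :
    pvStepB cm m s i j = s := by
  unfold pvStepB; rw [if_neg h]

-- the bounds used by pvStep_eq, read off the shape invariant and Pre_
theorem pvBounds (cnt : List (List Int)) (s2 : List (List Int))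
    (hInv : s2.map List.length = cnt.map List.length)
    (hlen : cnt.length ≥ k) (hrows : ∀ row ∈ cnt, k ≤ row.length)
    (i j : Int) (hi0 : 0 ≤ i) (hi1 : i < (k:Int)) (hj0 : 0 ≤ j) (hj1 : j < (k:Int)) :
    i.toNat < s2.length ∧ j.toNat < (s2.getD i.toNat []).length := by
  have hL : s2.length = cnt.length := by
    have := congrArg List.length hInv
    simpa using this
  have hi : i.toNat < s2.length := by omega
  refine ⟨hi, ?_⟩
  have hic : i.toNat < cnt.length := by omega
  have hrow : (s2.getD i.toNat []).length = (cnt.getD i.toNat []).length := by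
    rw [List.getD_eq_getElem _ _ hi, List.getD_eq_getElem _ _ hic]
    have h1 : (s2.map List.length)[i.toNat]'(by simpa using hi) =
        (cnt.map List.length)[i.toNat]'(by simpa using hic) := by
      simp only [hInv]
    simpa using h1
  have hmem : cnt[i.toNat] ∈ cnt := List.getElem_mem hic
  have := hrows _ hmem
  rw [hrow, List.getD_eq_getElem _ _ hic]
  omega

set_option maxHeartbeats 1000000 in
theorem check_layer1_main (cell_matrix : List (List (List Int))) (color_matrix : List (List Int)) (m : Int) (count_matrix : List (List Int))
    (hpre : Pre_check_layer1 cell_matrix color_matrix m count_matrix) :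
    check_layer1 cell_matrix color_matrix m count_matrix = check_layer1_alt cell_matrix color_matrix m count_matrix := by
  rcases hpre with hnw | hpre
  · -- no white cell: every iteration of either loop is a no-op
    unfold check_layer1 check_layer1_alt
    dsimp only
    have hguard : ∀ s : List (List Int) × List (List Int), s.1 = color_matrix →
        ∀ a b : Int, a ∈ PySem.List.pyRange 0 (cell_matrix.length : Int) 1 →
        b ∈ PySem.List.pyRange 0 (cell_matrix.length : Int) 1 → ¬ pvGet2 s.1 a b = 0 := by
      intro s hs a b ha hb
      have ha' := PySem.List.mem_pyRange_one.mp ha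
      have hb' := PySem.List.mem_pyRange_one.mp hb
      rw [hs]
      unfold pvGet2
      rw [PySem.List.pyGetD_of_nonneg _ _ (by omega), PySem.List.pyGetD_of_nonneg _ _ (by omega)]
      exact hnw a.toNat (by omega) b.toNat (by omega)
    have hA : (PySem.List.pyRange 0 (cell_matrix.length : Int) 1).foldl
        (fun s i => (PySem.List.pyRange 0 (cell_matrix.length : Int) 1).foldl
          (fun s j => pvStepA cell_matrix m s i j) s) (color_matrix, count_matrix) =
        (color_matrix, count_matrix) := by
      refine pvFoldl_id (fun s => s.1 = color_matrix) _ _ _ rfl ?_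
      intro s a hP ha
      refine pvFoldl_id (fun s => s.1 = color_matrix) _ _ _ hP ?_
      intro s' b hP' hb
      exact pvStepA_not_white cell_matrix m s' a b (hguard s' hP' a b ha hb)
    have hB : (PySem.List.pyRange 0 (cell_matrix.length : Int) 1).foldl
        (fun s i => (PySem.List.pyRange 0 (cell_matrix.length : Int) 1).foldl
          (fun s j => pvStepB cell_matrix m s i j) s) (color_matrix, count_matrix) =
        (color_matrix, count_matrix) := by
      refine pvFoldl_id (fun s => s.1 = color_matrix) _ _ _ rfl ?_
      intro s a hP ha
      refine pvFoldl_id (fun s => s.1 = color_matrix) _ _ _ hP ?_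
      intro s' b hP' hb
      exact pvStepB_not_white cell_matrix m s' a b (hguard s' hP' a b ha hb)
    rw [hA, hB]
  obtain ⟨hcm, hcol1, hcol2, hcnt1, hcnt2, h1white⟩ := hpre
  unfold check_layer1 check_layer1_alt
  dsimp only
  by_cases hn0 : cell_matrix.length = 0
  · rw [PySem.List.pyRange_one_eq_nil (by omega)]
    rfl
  by_cases hn1 : cell_matrix.length = 1
  · have hr : PySem.List.pyRange 0 (cell_matrix.length : Int) 1 = [0] := by
      rw [show ((cell_matrix.length : Nat) : Int) = 0 + 1 by omega]
      exact PySem.List.pyRange_one_singleton 0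
    have hg : ¬ pvGet2 color_matrix 0 0 = 0 := by
      have hx := h1white hn1
      unfold pvGet2
      rw [PySem.List.pyGetD_zero, PySem.List.pyGetD_zero]
      exact hx
    rw [hr]
    simp only [List.foldl_cons, List.foldl_nil]
    rw [pvStepA_not_white cell_matrix m (color_matrix, count_matrix) 0 0 hg,
        pvStepB_not_white cell_matrix m (color_matrix, count_matrix) 0 0 hg]
  · -- n ≥ 2
    have hn2 : 2 ≤ ((cell_matrix.length : Nat) : Int) := by omega
    have key : (PySem.List.pyRange 0 (cell_matrix.length : Int) 1).foldl
        (fun s i => (PySem.List.pyRange 0 (cell_matrix.length : Int) 1).foldl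
          (fun s j => pvStepA cell_matrix m s i j) s) (color_matrix, count_matrix) =
        (PySem.List.pyRange 0 (cell_matrix.length : Int) 1).foldl
        (fun s i => (PySem.List.pyRange 0 (cell_matrix.length : Int) 1).foldl
          (fun s j => pvStepB cell_matrix m s i j) s) (color_matrix, count_matrix) := by
      refine pvFoldl_congr_inv
        (fun s => s.2.map List.length = count_matrix.map List.length) _ _ _ _ rfl ?_
      intro s a hInv ha
      have hmema := PySem.List.mem_pyRange_one.mp ha
      constructor
      · refine pvFoldl_congr_inv
          (fun s => s.2.map List.length = count_matrix.map List.length) _ _ _ _ hInv ?_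
        intro s b hInv' hb
        have hmemb := PySem.List.mem_pyRange_one.mp hb
        have hbd := pvBounds count_matrix s.2 hInv' (by omega) hcnt2 a b
          (by omega) (by omega) (by omega) (by omega)
        exact ⟨pvStep_eq cell_matrix m s a b hn2 (by omega) (by omega) (by omega) (by omega)
          hbd.1 hbd.2,
          (pvStepA_shape cell_matrix m s a b).trans hInv'⟩
      · exact pvFoldl_inv
          (fun (s : List (List Int) × List (List Int)) =>
            s.2.map List.length = count_matrix.map List.length)
          (fun s j => pvStepA cell_matrix m s a j)
          (PySem.List.pyRange 0 (cell_matrix.length : Int) 1) s hInv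
          (fun s b hInv' _ => (pvStepA_shape cell_matrix m s a b).trans hInv')
    rw [key]

-- ===== VERDICT (by name: the statement is the Claim_ definition above) =====
theorem check_layer1_spec : Claim_equal_check_layer1 := by
  intro cell_matrix color_matrix m count_matrix _ hpre
  exact check_layer1_main cell_matrix color_matrix m count_matrix hpre

theorem check_layer1_raises : Claim_raises_check_layer1 := by
  unfold Claim_raises_check_layer1
  constructor
  · intro cm col m cnt _ hr hp
    rcases hp with hnw | hp
    · have h1 := hr.1
      exact hnw 0 (by omega) 0 (by omega) hr.2.2.2.2.2
    · exact hp.2.2.2.2.2 hr.1 hr.2.2.2.2.2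
  · exact ⟨by decide, by decide, by decide⟩

-- self-check: the raise witness lies inside Raises_ (keeps the raises claim cited by name)
theorem pvRaiseWitness_ok :
    Raises_check_layer1 pvRaiseWitness_check_layer1.1 pvRaiseWitness_check_layer1.2.1
      pvRaiseWitness_check_layer1.2.2.1 pvRaiseWitness_check_layer1.2.2.2 :=
  check_layer1_raises.2.2.1
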